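-- pv_equiv track=rewrite | github.com/ocean-ai-data-challenges/dc-tools | dctools/data/datasets/dataset.py | _has_unknown_argo_catalog_paths
-- ===== SOURCE A (Python) =====
-- from typing import (
--     Any,
--     Dict,
--     Iterator,
--     List,
--     Optional,
--     Type,
--     TYPE_CHECKING,
-- )
--
-- def _has_unknown_argo_catalog_paths(paths: List[str], valid_keys: List[str]) -> bool:
--     """Return True when ARGO catalog contains keys unknown to current master index."""
--     valid_set = set(valid_keys)
--     if not valid_set:
--         return False
--     for path in paths:
--         if path not in valid_set:
--             return True
--     return False
-- ===== SOURCE B (Python) =====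
-- def _has_unknown_argo_catalog_paths(paths, valid_keys):
--     """Return True when ARGO catalog contains keys unknown to current master index."""
--     if not valid_keys:
--         return False
--     ps = sorted(set(paths))
--     vs = sorted(set(valid_keys))
--     i = 0
--     j = 0
--     while i < len(ps):
--         if j == len(vs):
--             return True
--         if ps[i] == vs[j]:
--             i += 1
--         elif vs[j] < ps[i]:
--             j += 1
--         else:
--             return True
--     return False
-- ===== Notes on version B (the rewrite author's own statement) =====
-- stated objective: alternative
-- what changed: Replaces the hash-set membership scan with a sort-then-merge containment check: both lists are deduplicated and sorted, then a two-pointer merge walk reports True as soon as a path cannot be aligned with a valid key.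
import Mathlib
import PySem

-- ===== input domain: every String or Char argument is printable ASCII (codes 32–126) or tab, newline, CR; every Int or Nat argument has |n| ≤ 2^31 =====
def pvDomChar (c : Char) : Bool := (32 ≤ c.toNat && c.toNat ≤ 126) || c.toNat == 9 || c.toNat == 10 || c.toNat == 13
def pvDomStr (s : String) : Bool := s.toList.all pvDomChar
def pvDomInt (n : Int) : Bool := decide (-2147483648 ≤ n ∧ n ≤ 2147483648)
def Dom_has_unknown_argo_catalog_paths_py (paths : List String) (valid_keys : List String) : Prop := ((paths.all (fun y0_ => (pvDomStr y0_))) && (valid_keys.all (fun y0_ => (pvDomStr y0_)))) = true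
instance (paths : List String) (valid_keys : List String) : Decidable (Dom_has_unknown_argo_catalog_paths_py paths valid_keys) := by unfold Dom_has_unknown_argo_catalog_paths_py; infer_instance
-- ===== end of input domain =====

-- B replaces A's hash-set membership scan with sort-then-merge: dedup+sort both lists and walk them with two pointers (alternative algorithm, not claimed faster).


-- ===== PORT A =====
-- A: build set(valid_keys); empty → False; else scan paths, early True on first path not in the set.
def has_unknown_argo_catalog_paths_py (paths : List String) (valid_keys : List String) : Bool :=
  let valid_set := PySem.Set.ofList valid_keys
  if valid_set.isEmpty then false
  else paths.any (fun path => !(PySem.Set.contains valid_set path))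

-- ===== PORT B =====
-- B's while-loop with two indices, transcribed as the equivalent structural two-pointer walk
-- over the (sorted, duplicate-free) suffixes that the indices i and j designate.
def pvMergeWalk : List String → List String → Bool
  | [], _ => false                                  -- i == len(ps): return False
  | _ :: _, [] => true                              -- j == len(vs): return True
  | p :: ps, v :: vs =>
      if p == v then pvMergeWalk ps (v :: vs)       -- ps[i] == vs[j]: i += 1
      else if v < p then pvMergeWalk (p :: ps) vs   -- vs[j] < ps[i]: j += 1
      else true                                     -- ps[i] < vs[j]: return True

-- B: guard on empty valid_keys, then sort the deduplicated lists and merge-walk them.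
def has_unknown_argo_catalog_paths_py_alt (paths : List String) (valid_keys : List String) : Bool :=
  if valid_keys.isEmpty then false
  else
    let ps := PySem.List.sorted (PySem.Set.ofList paths) (fun x => x) false
    let vs := PySem.List.sorted (PySem.Set.ofList valid_keys) (fun x => x) false
    pvMergeWalk ps vs

-- ===== PRECONDITION & SPEC =====
def Spec_has_unknown_argo_catalog_paths_py (paths : List String) (valid_keys : List String) (out : Bool) : Prop := out = has_unknown_argo_catalog_paths_py_alt paths valid_keys
instance (paths : List String) (valid_keys : List String) (out : Bool) : Decidable (Spec_has_unknown_argo_catalog_paths_py paths valid_keys out) := by unfold Spec_has_unknown_argo_catalog_paths_py; infer_instance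

-- ===== CLAIM (what is proved, stated in full; the proofs are below) =====
def Claim_equal_has_unknown_argo_catalog_paths_py : Prop := ∀ (paths : List String) (valid_keys : List String), Dom_has_unknown_argo_catalog_paths_py paths valid_keys → Spec_has_unknown_argo_catalog_paths_py paths valid_keys (has_unknown_argo_catalog_paths_py paths valid_keys)

-- ===== LEMMAS AND PROOFS =====

-- On strictly increasing lists, the merge walk returns false exactly when every element
-- of the first list occurs in the second.
theorem pvMergeWalk_eq_false_iff (ps vs : List String)
    (hp : ps.Pairwise (· < ·)) (hv : vs.Pairwise (· < ·)) :
    pvMergeWalk ps vs = false ↔ ∀ x ∈ ps, x ∈ vs := by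
  induction ps, vs using pvMergeWalk.induct with
  | case1 vs => simp [pvMergeWalk]
  | case2 p ps => exact ⟨by simp [pvMergeWalk], fun h => absurd (h p List.mem_cons_self) (List.not_mem_nil)⟩
  | case3 p ps v vs heq ih =>
    have hpv : p = v := by simpa using heq
    subst hpv
    rw [pvMergeWalk, if_pos (by simp)]
    rw [ih hp.of_cons hv]
    constructor
    · intro h x hx
      rcases List.mem_cons.mp hx with rfl | hx
      · exact List.mem_cons_self
      · exact h x hx
    · intro h x hx; exact h x (List.mem_cons_of_mem _ hx)
  | case4 p ps v vs heq hlt ih =>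
    have hne : p ≠ v := by simpa using heq
    rw [pvMergeWalk, if_neg (by simpa using hne), if_pos hlt]
    rw [ih hp hv.of_cons]
    have hkey : ∀ x ∈ p :: ps, (x ∈ v :: vs ↔ x ∈ vs) := by
      intro x hx
      have hvx : v < x := by
        rcases List.mem_cons.mp hx with rfl | hx'
        · exact hlt
        · exact lt_trans hlt (List.rel_of_pairwise_cons hp hx')
      constructor
      · intro h; rcases List.mem_cons.mp h with rfl | h
        · exact absurd hvx (lt_irrefl x)
        · exact h
      · exact List.mem_cons_of_mem _
    constructor
    · intro h x hx; exact (hkey x hx).mpr (h x hx)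
    · intro h x hx; exact (hkey x hx).mp (h x hx)
  | case5 p ps v vs heq hnlt =>
    have hne : p ≠ v := by simpa using heq
    rw [pvMergeWalk, if_neg (by simpa using hne), if_neg hnlt]
    have hpv : p < v := lt_of_le_of_ne (not_lt.mp hnlt) hne
    simp only [Bool.true_eq_false, false_iff]
    intro h
    have hmem := h p List.mem_cons_self
    rcases List.mem_cons.mp hmem with rfl | hmem'
    · exact hne rfl
    · exact absurd (lt_trans hpv (List.rel_of_pairwise_cons hv hmem')) (lt_irrefl p)

-- ===== VERDICT (by name: the statement is the Claim_ definition above) =====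
theorem has_unknown_argo_catalog_paths_py_spec : Claim_equal_has_unknown_argo_catalog_paths_py := by
  intro paths valid_keys _
  unfold Spec_has_unknown_argo_catalog_paths_py
  unfold has_unknown_argo_catalog_paths_py has_unknown_argo_catalog_paths_py_alt
  by_cases hv : valid_keys = []
  · subst hv; simp [PySem.Set.ofList]
  · have h1 : (PySem.Set.ofList valid_keys).isEmpty = false := by
      rw [List.isEmpty_eq_false_iff_exists_mem]
      obtain ⟨x, hx⟩ := List.exists_mem_of_ne_nil valid_keys hv
      exact ⟨x, (PySem.Set.mem_ofList _ _).mpr hx⟩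
    have h2 : valid_keys.isEmpty = false := by simpa [List.isEmpty_iff] using hv
    simp only [h1, h2, Bool.false_eq_true, if_false]
    have hiff := pvMergeWalk_eq_false_iff
      (PySem.List.sorted (PySem.Set.ofList paths) (fun x => x) false)
      (PySem.List.sorted (PySem.Set.ofList valid_keys) (fun x => x) false)
      (PySem.List.sorted_ofList_pairwise_lt paths)
      (PySem.List.sorted_ofList_pairwise_lt valid_keys)
    simp only [PySem.List.mem_sorted, PySem.Set.mem_ofList] at hiff
    rcases hw : pvMergeWalk
        (PySem.List.sorted (PySem.Set.ofList paths) (fun x => x) false)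
        (PySem.List.sorted (PySem.Set.ofList valid_keys) (fun x => x) false) with _ | _
    · have hall := hiff.mp hw
      rw [List.any_eq_false]
      intro x hx
      simp [PySem.Set.contains, (PySem.Set.mem_ofList _ _).mpr (hall x hx)]
    · rw [List.any_eq_true]
      by_contra hno
      push Not at hno
      have : ∀ x ∈ paths, x ∈ valid_keys := by
        intro x hx
        have := hno x hx
        simp [PySem.Set.contains] at this
        exact (PySem.Set.mem_ofList _ _).mp (by simpa using this)
      rw [hiff.mpr this] at hw
      exact Bool.false_ne_true hw
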